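-- pv_equiv track=rewrite | github.com/isaacbc/DFA-Simulator | main.py | createTransitionsDic
-- ===== SOURCE A (Python) =====
-- def createTransitionsDic(lista):
--   transitions = {}
--   for transicao in lista:
--     #destruct da lista ["q0", "a", "q1] = origem, simbolo, destino
--     origem, simbolo, destino = transicao
--     if origem not in transitions:
--       transitions[origem] = {}
--
--     # q0['a'] = q1
--     transitions[origem][simbolo] = destino
--   return transitions
-- ===== SOURCE B (Python) =====
-- def createTransitionsDic(lista):
--   # Grouped two-phase build: collect origins in first-occurrence order,
--   # then fill each bucket with a dict comprehension (last destino wins,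
--   # symbol order = first occurrence), instead of A's flat single-pass insertion.
--   origins = dict.fromkeys(origem for origem, _, _ in lista)
--   return {o: {simbolo: destino for origem, simbolo, destino in lista if origem == o}
--           for o in origins}
-- ===== Notes on version B (the rewrite author's own statement) =====
-- stated objective: alternative
-- what changed: B builds the nested dict in two grouped phases (dedup the origins, then one dict comprehension per origin over the filtered triples) instead of A's flat single-pass insert-with-default loop.
import Mathlib
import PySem

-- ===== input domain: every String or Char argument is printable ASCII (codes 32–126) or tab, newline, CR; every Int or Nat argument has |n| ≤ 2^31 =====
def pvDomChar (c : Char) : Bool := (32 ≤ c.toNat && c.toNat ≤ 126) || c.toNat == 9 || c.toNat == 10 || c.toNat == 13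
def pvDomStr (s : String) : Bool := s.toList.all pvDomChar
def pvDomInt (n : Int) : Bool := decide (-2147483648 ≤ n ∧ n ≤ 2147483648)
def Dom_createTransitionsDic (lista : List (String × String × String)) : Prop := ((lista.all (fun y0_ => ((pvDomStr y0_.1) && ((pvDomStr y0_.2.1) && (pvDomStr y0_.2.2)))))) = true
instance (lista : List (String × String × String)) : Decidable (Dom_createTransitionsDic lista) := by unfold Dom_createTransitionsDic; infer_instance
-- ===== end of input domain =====

-- B builds the nested dict in two grouped phases (dedup the origins, then one dict
-- comprehension per origin over the filtered triples) instead of A's flat single-pass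
-- insert-with-default loop; objective: alternative decomposition, same results.

-- ===== PORT A =====
def createTransitionsDic (lista : List (String × String × String)) : List (String × List (String × String)) :=
  let transitions : PySem.Dict String (PySem.Dict String String) :=
    lista.foldl (fun tr t =>
      -- origem, simbolo, destino = transicao
      let origem := t.1; let simbolo := t.2.1; let destino := t.2.2
      -- if origem not in transitions: transitions[origem] = {}
      let tr := if tr.contains origem then tr else tr.insert origem PySem.Dict.empty
      -- transitions[origem][simbolo] = destino
      tr.insert origem ((tr.getD origem PySem.Dict.empty).insert simbolo destino))
      PySem.Dict.empty
  transitions.items.map (fun p => (p.1, p.2.items))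

-- ===== PORT B =====
-- {simbolo: destino for origem, simbolo, destino in lista if origem == o}
def innerComp (lista : List (String × String × String)) (o : String) : PySem.Dict String String :=
  (lista.filter (fun t => t.1 == o)).foldl (fun d t => d.insert t.2.1 t.2.2) PySem.Dict.empty

def createTransitionsDic_alt (lista : List (String × String × String)) : List (String × List (String × String)) :=
  let origins := PySem.List.dedup (lista.map (·.1))   -- dict.fromkeys(origem for origem, _, _ in lista)
  origins.map (fun o => (o, (innerComp lista o).items))

-- ===== PRECONDITION & SPEC =====
def Spec_createTransitionsDic (lista : List (String × String × String)) (out : List (String × List (String × String))) : Prop := out = createTransitionsDic_alt lista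
instance (lista : List (String × String × String)) (out : List (String × List (String × String))) : Decidable (Spec_createTransitionsDic lista out) := by unfold Spec_createTransitionsDic; infer_instance

-- ===== CLAIM (what is proved, stated in full; the proofs are below) =====
def Claim_equal_createTransitionsDic : Prop := ∀ (lista : List (String × String × String)), Dom_createTransitionsDic lista → Spec_createTransitionsDic lista (createTransitionsDic lista)

-- ===== LEMMAS AND PROOFS =====

-- A's loop body, named for the proofs
def aStep (tr : PySem.Dict String (PySem.Dict String String)) (t : String × String × String) : PySem.Dict String (PySem.Dict String String) :=
  let tr := if tr.contains t.1 then tr else tr.insert t.1 PySem.Dict.empty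
  tr.insert t.1 ((tr.getD t.1 PySem.Dict.empty).insert t.2.1 t.2.2)

theorem innerComp_append (l : List (String × String × String)) (t : String × String × String) (o : String) :
    innerComp (l ++ [t]) o =
      if t.1 = o then (innerComp l o).insert t.2.1 t.2.2 else innerComp l o := by
  simp only [innerComp, List.filter_append, List.foldl_append]
  by_cases h : t.1 = o
  · simp [h]
  · have hb : (t.1 == o) = false := by simp [h]
    simp [hb, h]

theorem aFold_invariant (l : List (String × String × String)) :
    (l.foldl aStep PySem.Dict.empty).keys.Nodup ∧
    (l.foldl aStep PySem.Dict.empty).items =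
      (PySem.List.dedup (l.map (·.1))).map (fun o => (o, innerComp l o)) := by
  induction l using List.reverseRecOn with
  | nil => simp [PySem.Dict.empty, PySem.List.dedup]
  | append_singleton l t ih =>
    obtain ⟨hnd, hitems⟩ := ih
    have hkeys : (l.foldl aStep PySem.Dict.empty).keys = PySem.List.dedup (l.map (·.1)) := by
      simp only [PySem.Dict.keys, hitems, List.map_map, Function.comp_def]; simp
    rw [List.foldl_append, List.foldl_cons, List.foldl_nil]
    set D := l.foldl aStep PySem.Dict.empty with hD
    by_cases hmem : t.1 ∈ PySem.List.dedup (l.map (·.1))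
    · -- origem already a key: outer structure unchanged, inner dict updated in place
      have hcont : D.contains t.1 = true := by
        rw [PySem.Dict.contains_iff_mem_keys, hkeys]; exact hmem
      have hgd : D.getD t.1 PySem.Dict.empty = innerComp l t.1 :=
        PySem.Dict.getD_of_mem_items D
          (by rw [hitems]; exact List.mem_map_of_mem hmem) hnd PySem.Dict.empty
      constructor
      · simp only [aStep, hcont, if_true]
        exact PySem.Dict.nodup_keys_insert _ _ _ hnd
      · simp only [aStep, hcont, if_true, hgd]
        rw [PySem.Dict.items_insert_of_contains _ _ hcont, hitems]
        have hded : PySem.List.dedup ((l ++ [t]).map (·.1)) = PySem.List.dedup (l.map (·.1)) := by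
          simp only [List.map_append, List.map_cons, List.map_nil, PySem.List.dedup_eq_ofList,
            PySem.Set.ofList_append_singleton, PySem.Set.add]
          rw [if_pos]
          rw [PySem.Set.contains_iff]
          simpa [PySem.List.dedup_eq_ofList] using hmem
        rw [hded, List.map_map]
        apply List.map_congr_left
        intro o _
        by_cases ho : o = t.1
        · subst ho; simp [innerComp_append]
        · have hb : ((o, innerComp l o).1 == t.1) = false := by simpa using ho
          simp [innerComp_append, Ne.symm ho, ho]
    · -- fresh origem: appended at the end with a one-entry inner dict
      have hcont : D.contains t.1 = false := by
        rw [← Bool.not_eq_true, PySem.Dict.contains_iff_mem_keys, hkeys]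
        exact hmem
      have hstep : aStep D t = D.insert t.1 ((PySem.Dict.empty : PySem.Dict String String).insert t.2.1 t.2.2) := by
        simp only [aStep, hcont, Bool.false_eq_true, if_false]
        rw [PySem.Dict.getD_insert_self, PySem.Dict.insert_insert_self]
      constructor
      · rw [hstep]; exact PySem.Dict.nodup_keys_insert _ _ _ hnd
      · rw [hstep, PySem.Dict.items_insert_of_not_contains _ _ hcont, hitems]
        have hded : PySem.List.dedup ((l ++ [t]).map (·.1)) = PySem.List.dedup (l.map (·.1)) ++ [t.1] := by
          simp only [List.map_append, List.map_cons, List.map_nil, PySem.List.dedup_eq_ofList,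
            PySem.Set.ofList_append_singleton, PySem.Set.add]
          rw [if_neg]
          rw [PySem.Set.contains_iff]
          simpa [PySem.List.dedup_eq_ofList] using hmem
        rw [hded, List.map_append]
        congr 1
        · apply List.map_congr_left
          intro o hodup
          have ho : o ≠ t.1 := fun h => hmem (h ▸ hodup)
          simp [innerComp_append, Ne.symm ho]
        · have hfilt : innerComp (l ++ [t]) t.1 = (PySem.Dict.empty : PySem.Dict String String).insert t.2.1 t.2.2 := by
            have hnil : innerComp l t.1 = PySem.Dict.empty := by
              simp only [innerComp]
              have : l.filter (fun x => x.1 == t.1) = [] := by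
                rw [List.filter_eq_nil_iff]
                intro x hx hbeq
                exact hmem (by
                  simp only [PySem.List.dedup_eq_ofList, PySem.Set.mem_ofList]
                  exact (beq_iff_eq.mp hbeq) ▸ List.mem_map_of_mem hx)
              rw [this, List.foldl_nil]
            rw [innerComp_append, if_pos rfl, hnil]
          simp [hfilt]

-- ===== VERDICT (by name: the statement is the Claim_ definition above) =====
theorem createTransitionsDic_spec : Claim_equal_createTransitionsDic := by
  intro lista _
  unfold Spec_createTransitionsDic
  have hA : createTransitionsDic lista =
      (lista.foldl aStep PySem.Dict.empty).items.map (fun p => (p.1, p.2.items)) := rfl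
  rw [hA, (aFold_invariant lista).2, List.map_map]
  simp [createTransitionsDic_alt, Function.comp_def]
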